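-- pv_equiv track=rewrite | github.com/vladofilipovic/SGI_Python | SoluzioniTemi/2017-18/2018-09/Macchinari.py | statisticheTurbineSpeciali
-- ===== SOURCE A (Python) =====
-- def listaATurbineSpeciali():
--     return [1, 5, 10, 12, 34, 33, 40, 51]
--
-- def statisticheTurbineSpeciali(rot):
--     listaTS = listaATurbineSpeciali ()
--     #for i in range(len(listaTS)):
--         #idTurbinaSpeciale = listaTS[i]
--     nRotte = 0
--     nSane = 0
--     for idTurbina in rot.keys():
--         if idTurbina in listaTS:
--             valore = rot.get(idTurbina,0)
--             if valore =="N":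
--                 nSane = nSane + 1
--             else:
--                 nRotte = nRotte + 1
--     print (nSane,nRotte)
--     return (nSane, nRotte)
-- ===== SOURCE B (Python) =====
-- def listaATurbineSpeciali():
--     return [1, 5, 10, 12, 34, 33, 40, 51]
--
-- def statisticheTurbineSpeciali(rot):
--     vals = [rot[i] for i in listaATurbineSpeciali() if i in rot]
--     nSane = vals.count("N")
--     nRotte = len(vals) - nSane
--     print(nSane, nRotte)
--     return (nSane, nRotte)
-- ===== Notes on version B (the rewrite author's own statement) =====
-- stated objective: alternative
-- what changed: B first extracts the list of states of the special turbines present in the dict (a comprehension over the eight fixed ids), then derives the counts as vals.count('N') and len(vals)-that, instead of A's single scan over all dict keys with two conditional counters.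
import Mathlib
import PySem

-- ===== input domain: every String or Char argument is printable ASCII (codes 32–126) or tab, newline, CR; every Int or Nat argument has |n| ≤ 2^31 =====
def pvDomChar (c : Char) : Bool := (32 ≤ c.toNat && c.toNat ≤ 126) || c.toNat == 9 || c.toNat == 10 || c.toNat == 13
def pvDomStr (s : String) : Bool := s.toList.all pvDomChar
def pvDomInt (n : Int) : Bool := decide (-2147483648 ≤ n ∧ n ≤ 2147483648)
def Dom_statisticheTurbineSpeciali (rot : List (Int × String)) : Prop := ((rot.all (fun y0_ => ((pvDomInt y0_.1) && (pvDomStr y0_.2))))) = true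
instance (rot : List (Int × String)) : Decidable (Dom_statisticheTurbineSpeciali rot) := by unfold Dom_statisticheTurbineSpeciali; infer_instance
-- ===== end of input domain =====

-- B extracts the list of states of the special turbines present in the dict, then derives the
-- counts as count "N" / length, instead of A's key scan with two conditional counters; the
-- equivalence is about the return value (both Pythons also print it).


-- ===== PORT A =====
def listaATurbineSpeciali : List Int := [1, 5, 10, 12, 34, 33, 40, 51]

-- for idTurbina in rot.keys(): if idTurbina in listaTS: valore = rot.get(idTurbina, 0); …
-- (rot.get default 0 is not "N", so the unreachable none case takes the else branch)
def statisticheTurbineSpeciali (rot : List (Int × String)) : Int × Int :=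
  (rot.map (·.1)).foldl (fun acc idTurbina =>
    if listaATurbineSpeciali.contains idTurbina then
      match rot.find? (fun p => p.1 == idTurbina) with
      | some p => if p.2 = "N" then (acc.1 + 1, acc.2) else (acc.1, acc.2 + 1)
      | none => (acc.1, acc.2 + 1)
    else acc) (0, 0)

-- ===== PORT B =====
-- vals = [rot[i] for i in listaATurbineSpeciali() if i in rot]  — the guard 'i in rot' is
-- exactly 'find? is some', so guard + rot[i] port together as one filterMap;
-- nSane = vals.count("N"); nRotte = len(vals) - nSane
def statisticheTurbineSpeciali_alt (rot : List (Int × String)) : Int × Int :=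
  let vals := listaATurbineSpeciali.filterMap
      (fun i => (rot.find? (fun p => p.1 == i)).map (·.2))
  let nSane : Int := vals.count "N"
  (nSane, (vals.length : Int) - nSane)

-- ===== PRECONDITION & SPEC =====
-- Pre_ excludes association lists with duplicate keys: they do not represent any Python dict,
-- so A (whose parameter is a dict) is never run on them.
def Pre_statisticheTurbineSpeciali (rot : List (Int × String)) : Prop :=
  (rot.map (·.1)).Nodup
instance (rot : List (Int × String)) : Decidable (Pre_statisticheTurbineSpeciali rot) := by unfold Pre_statisticheTurbineSpeciali; infer_instance

def pvWitness_statisticheTurbineSpeciali : (List (Int × String)) := [(1, "N"), (5, "G"), (7, "N")]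

def Spec_statisticheTurbineSpeciali (rot : List (Int × String)) (out : Int × Int) : Prop := out = statisticheTurbineSpeciali_alt rot
instance (rot : List (Int × String)) (out : Int × Int) : Decidable (Spec_statisticheTurbineSpeciali rot out) := by unfold Spec_statisticheTurbineSpeciali; infer_instance

-- ===== CLAIM (what is proved, stated in full; the proofs are below) =====
def Claim_equal_statisticheTurbineSpeciali : Prop := ∀ (rot : List (Int × String)), Dom_statisticheTurbineSpeciali rot → Pre_statisticheTurbineSpeciali rot → Spec_statisticheTurbineSpeciali rot (statisticheTurbineSpeciali rot)

-- ===== LEMMAS AND PROOFS =====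

-- contribution of one key id to (nSane, nRotte) in A's loop
def pvCnt (rot : List (Int × String)) (id : Int) : Int × Int :=
  match rot.find? (fun p => p.1 == id) with
  | some p => if p.2 = "N" then (1, 0) else (0, 1)
  | none => (0, 1)

lemma pv_foldl_cnt (rot : List (Int × String)) (P : Int → Bool) :
    ∀ (l : List Int) (init : Int × Int),
      l.foldl (fun acc x => if P x then
          (acc.1 + (pvCnt rot x).1, acc.2 + (pvCnt rot x).2) else acc) init
        = init + ((l.filter P).map (pvCnt rot)).sum := by
  intro l
  induction l with
  | nil => intro init; simp
  | cons x l ih =>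
    intro init
    simp only [List.foldl_cons, List.filter_cons]
    by_cases h : P x
    · simp only [h, if_true, ih]
      simp [Prod.ext_iff, Prod.fst_add, Prod.snd_add]
      constructor <;> ring
    · simp [h, ih]

lemma pv_stepA (rot : List (Int × String)) :
    (fun (acc : Int × Int) idTurbina =>
      if listaATurbineSpeciali.contains idTurbina then
        match rot.find? (fun p => p.1 == idTurbina) with
        | some p => if p.2 = "N" then (acc.1 + 1, acc.2) else (acc.1, acc.2 + 1)
        | none => (acc.1, acc.2 + 1)
      else acc)
    = (fun acc x => if listaATurbineSpeciali.contains x then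
        (acc.1 + (pvCnt rot x).1, acc.2 + (pvCnt rot x).2) else acc) := by
  funext acc x
  by_cases h : x ∈ listaATurbineSpeciali
  · simp only [List.contains_iff_mem, h, if_true, pvCnt]
    cases hf : rot.find? (fun p => p.1 == x) with
    | none => simp
    | some p => by_cases hn : p.2 = "N" <;> simp [hn]
  · simp [h]

lemma pv_any_find (rot : List (Int × String)) (x : Int) :
    rot.any (fun p => p.1 == x) = (rot.find? (fun p => p.1 == x)).isSome := by
  induction rot with
  | nil => rfl
  | cons p l ih =>
    by_cases h : p.1 == x
    · simp [List.any_cons, h]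
    · simp [List.any_cons, h, ih]

lemma pv_mem_keys (rot : List (Int × String)) (x : Int) :
    rot.any (fun p => p.1 == x) = (rot.map (·.1)).contains x := by
  induction rot with
  | nil => rfl
  | cons p l ih => simp [List.any_cons, ih]; rw [BEq.comm]

-- A's per-key contributions over the present special ids sum to B's (count "N", length − count)
lemma pv_sum_eq_vals (rot : List (Int × String)) :
    ∀ (l : List Int),
      ((l.filter (fun x => (rot.find? (fun p => p.1 == x)).isSome)).map (pvCnt rot)).sum =
        (((l.filterMap (fun i => (rot.find? (fun p => p.1 == i)).map (·.2))).count "N" : Int),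
         ((l.filterMap (fun i => (rot.find? (fun p => p.1 == i)).map (·.2))).length : Int)
           - ((l.filterMap (fun i => (rot.find? (fun p => p.1 == i)).map (·.2))).count "N" : Int)) := by
  intro l
  induction l with
  | nil => simp [Prod.ext_iff]
  | cons x l ih =>
    simp only [List.filter_cons, List.filterMap_cons]
    cases hf : rot.find? (fun p => p.1 == x) with
    | none => simpa [hf] using ih
    | some p =>
      simp only [hf, Option.isSome_some, if_true, Option.map_some, List.map_cons, List.sum_cons,
        List.count_cons, List.length_cons, pvCnt]
      rw [ih]
      by_cases hn : p.2 = "N"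
      · have hbe : ((p.2 == "N") = true) := by simpa using hn
        simp only [hn, if_true, Prod.ext_iff, Prod.fst_add, Prod.snd_add]
        constructor <;> simp <;> push_cast <;> omega
      · have hne : ¬ ((p.2 == "N") = true) := by simpa using hn
        simp only [hn, if_false, hne, Prod.ext_iff, Prod.fst_add, Prod.snd_add]
        constructor <;> simp <;> push_cast <;> omega

-- ===== VERDICT (by name: the statement is the Claim_ definition above) =====
theorem statisticheTurbineSpeciali_spec : Claim_equal_statisticheTurbineSpeciali := by
  intro rot _ hpre
  show statisticheTurbineSpeciali rot = statisticheTurbineSpeciali_alt rot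
  unfold statisticheTurbineSpeciali statisticheTurbineSpeciali_alt
  rw [pv_stepA rot, pv_foldl_cnt]
  have hperm :
      ((rot.map (·.1)).filter (fun x => listaATurbineSpeciali.contains x)).Perm
        (listaATurbineSpeciali.filter (fun x => rot.any (fun p => p.1 == x))) := by
    rw [List.perm_iff_count]
    intro a
    have h1 : ((rot.map (·.1)).filter (fun x => listaATurbineSpeciali.contains x)).Nodup :=
      hpre.filter _
    have h2 : (listaATurbineSpeciali.filter (fun x => rot.any (fun p => p.1 == x))).Nodup := by
      apply List.Nodup.filter
      decide
    have hmem : a ∈ (rot.map (·.1)).filter (fun x => listaATurbineSpeciali.contains x) ↔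
        a ∈ listaATurbineSpeciali.filter (fun x => rot.any (fun p => p.1 == x)) := by
      simp only [List.mem_filter, pv_mem_keys, List.contains_iff_mem]
      constructor
      · rintro ⟨h, h'⟩; exact ⟨by simpa using h', by simpa [List.contains_iff_mem] using h⟩
      · rintro ⟨h, h'⟩; exact ⟨by simpa [List.contains_iff_mem] using h', by simpa using h⟩
    by_cases ha : a ∈ (rot.map (·.1)).filter (fun x => listaATurbineSpeciali.contains x)
    · rw [List.count_eq_one_of_mem h1 ha, List.count_eq_one_of_mem h2 (hmem.mp ha)]
    · rw [List.count_eq_zero_of_not_mem ha,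
        List.count_eq_zero_of_not_mem (fun h => ha (hmem.mpr h))]
  rw [(hperm.map (pvCnt rot)).sum_eq]
  have hpred : (fun x => rot.any (fun p => p.1 == x))
      = fun x => (rot.find? (fun p => p.1 == x)).isSome := funext (pv_any_find rot)
  rw [hpred, pv_sum_eq_vals]
  simp
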